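-- pv_equiv track=rewrite | github.com/antonwiklund99/AdventofCode | 2024/day7.py | rec2
-- ===== SOURCE A (Python) =====
-- def rec2(r, n, ns):
--     if n > r:
--         return False
--     comb = int(str(n) + str(ns[0]))
--     if len(ns) == 1 and (r == ns[0] * n or r == ns[0] + n or r == comb):
--         return True
--     elif len(ns) == 1:
--         return False
--     elif rec2(r, n * ns[0], ns[1:]) or rec2(r, n + ns[0], ns[1:]) or rec2(r, comb, ns[1:]):
--         return True
--     return False
-- ===== SOURCE B (Python) =====
-- def rec2(r, n, ns):
--     # Breadth-first over the list with a deduplicating frontier set instead of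
--     # A's exponential three-way recursion; same pruning (values > r are dropped).
--     frontier = {n} if n <= r else set()
--     for m in ns[:-1]:
--         nxt = set()
--         for v in frontier:
--             for w in (v * m, v + m, int(str(v) + str(m))):
--                 if w <= r:
--                     nxt.add(w)
--         frontier = nxt
--     m = ns[-1]
--     return any(r == v * m or r == v + m or r == int(str(v) + str(m)) for v in frontier)
-- ===== Notes on version B (the rewrite author's own statement) =====
-- stated objective: alternative
-- what changed: Replaces A's depth-first three-way recursion by a single left-to-right pass that keeps a deduplicated set of reachable intermediate values (same pruning of values > r), so identical subproblems are merged instead of re-explored.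
-- outside the precondition, e.g. on rec2(0, 5, []): A returns False, B raises IndexError; on rec2(10, 1, [100, -5]): A returns False, B returns False
import Mathlib
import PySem

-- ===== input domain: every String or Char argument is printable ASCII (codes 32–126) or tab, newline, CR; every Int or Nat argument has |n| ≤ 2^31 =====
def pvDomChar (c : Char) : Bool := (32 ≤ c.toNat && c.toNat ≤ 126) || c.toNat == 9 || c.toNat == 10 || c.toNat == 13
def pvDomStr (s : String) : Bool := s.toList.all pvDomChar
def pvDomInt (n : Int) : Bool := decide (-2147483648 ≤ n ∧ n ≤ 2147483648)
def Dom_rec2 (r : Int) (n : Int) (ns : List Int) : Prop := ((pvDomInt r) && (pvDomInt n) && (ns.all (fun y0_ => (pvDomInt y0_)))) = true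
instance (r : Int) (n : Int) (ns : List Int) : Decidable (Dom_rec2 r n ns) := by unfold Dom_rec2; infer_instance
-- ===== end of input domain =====

-- B replaces A's exponential three-way recursion by a left-to-right breadth-first
-- pass keeping a deduplicated set of reachable values (same pruning at > r); equal
-- return value on Pre_ (neither version mutates its arguments).


-- ===== PORT A =====
-- int(str(a) + str(b)); ValueError (b < 0) → the Option is none; .getD 0 is only a
-- totalisation, such inputs are outside Pre_rec2.
def pyConcat (a : Int) (b : Int) : Int :=
  (PySem.Int.ofStr? (PySem.Int.toStr a ++ PySem.Int.toStr b)).getD 0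

def rec2 (r : Int) (n : Int) (ns : List Int) : Bool :=
  if n > r then false
  else
    match ns with
    | [] => false            -- Python raises IndexError on ns[0] here; outside Pre_rec2
    | h :: t =>              -- h = ns[0], t = ns[1:]
      let comb := pyConcat n h
      if t = [] then decide (r = h * n) || decide (r = h + n) || decide (r = comb)
      else rec2 r (n * h) t || rec2 r (n + h) t || rec2 r comb t

-- ===== PORT B =====
-- one step of the loop body: nxt = {w for v in fr for w in (v*m, v+m, concat) if w <= r}
def altStep (r : Int) (fr : List Int) (m : Int) : List Int :=
  fr.foldl (fun nxt v =>
    ([v * m, v + m, pyConcat v m]).foldl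
      (fun nxt w => if w ≤ r then PySem.Set.add nxt w else nxt) nxt)
    PySem.Set.empty

def altFinal (r : Int) (m : Int) (v : Int) : Bool :=
  decide (r = v * m) || decide (r = v + m) || decide (r = pyConcat v m)

def rec2_alt (r : Int) (n : Int) (ns : List Int) : Bool :=
  let init : PySem.Set Int := if n ≤ r then PySem.Set.ofList [n] else PySem.Set.empty
  let frontier := (PySem.List.slice ns none (some (-1))).foldl (altStep r) init
  let m := (PySem.List.pyGet? ns (-1)).getD 0   -- ns[-1]: IndexError on []; outside Pre_rec2
  frontier.any (altFinal r m)

-- ===== PRECONDITION & SPEC =====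
-- Pre_ excludes ns = [] (A raises IndexError) and, when n ≤ r, any list containing a
-- negative number: there A may raise ValueError in int(str(n)+str(ns[0])); this is a
-- conservative closed form, so it also drops some inputs where pruning lets A return False.
def Pre_rec2 (r : Int) (n : Int) (ns : List Int) : Prop :=
  ns ≠ [] ∧ (r < n ∨ ∀ m ∈ ns, 0 ≤ m)
instance (r : Int) (n : Int) (ns : List Int) : Decidable (Pre_rec2 r n ns) := by unfold Pre_rec2; infer_instance

def pvWitness_rec2 : Int × Int × List Int := (10, 1, [2, 3])

def Spec_rec2 (r : Int) (n : Int) (ns : List Int) (out : Bool) : Prop := out = rec2_alt r n ns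
instance (r : Int) (n : Int) (ns : List Int) (out : Bool) : Decidable (Spec_rec2 r n ns out) := by unfold Spec_rec2; infer_instance

-- ===== CLAIM (what is proved, stated in full; the proofs are below) =====
def Claim_equal_rec2 : Prop := ∀ (r : Int) (n : Int) (ns : List Int), Dom_rec2 r n ns → Pre_rec2 r n ns → Spec_rec2 r n ns (rec2 r n ns)

-- ===== LEMMAS AND PROOFS =====

theorem any_congrOn {α : Type} (S : List α) (p q : α → Bool)
    (h : ∀ v ∈ S, p v = q v) : S.any p = S.any q := by
  induction S with
  | nil => rfl
  | cons x xs ih =>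
    simp only [List.any_cons]
    rw [h x (by simp), ih (fun v hv => h v (by simp [hv]))]

theorem rec2_of_gt {r n : Int} (ns : List Int) (h : r < n) : rec2 r n ns = false := by
  cases ns <;> simp [rec2, h]

theorem rec2_single (r v h : Int) (hv : v ≤ r) :
    rec2 r v [h] = (decide (r = h * v) || decide (r = h + v) || decide (r = pyConcat v h)) := by
  rw [rec2.eq_def, if_neg (not_lt.mpr hv)]
  simp

theorem rec2_cons_cons (r v h h2 : Int) (t2 : List Int) (hv : v ≤ r) :
    rec2 r v (h :: h2 :: t2) =
      (rec2 r (v * h) (h2 :: t2) || rec2 r (v + h) (h2 :: t2) || rec2 r (pyConcat v h) (h2 :: t2)) := by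
  rw [rec2.eq_def, if_neg (not_lt.mpr hv)]
  simp

theorem mem_addIf {r w : Int} (s : List Int) (y : Int) :
    y ∈ (if w ≤ r then PySem.Set.add s w else s) ↔ y ∈ s ∨ (y = w ∧ w ≤ r) := by
  split_ifs with hw <;> simp [PySem.Set.mem_add, hw]

theorem mem_fold3 {r : Int} (a b c y : Int) (s : List Int) :
    y ∈ ([a, b, c].foldl (fun nxt w => if w ≤ r then PySem.Set.add nxt w else nxt) s) ↔
      y ∈ s ∨ ((y = a ∨ y = b ∨ y = c) ∧ y ≤ r) := by
  simp only [List.foldl, mem_addIf]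
  constructor
  · rintro (((h | ⟨rfl, h⟩) | ⟨rfl, h⟩) | ⟨rfl, h⟩)
    · exact Or.inl h
    · exact Or.inr ⟨Or.inl rfl, h⟩
    · exact Or.inr ⟨Or.inr (Or.inl rfl), h⟩
    · exact Or.inr ⟨Or.inr (Or.inr rfl), h⟩
  · rintro (h | ⟨(rfl | rfl | rfl), h⟩)
    · exact Or.inl (Or.inl (Or.inl h))
    · exact Or.inl (Or.inl (Or.inr ⟨rfl, h⟩))
    · exact Or.inl (Or.inr ⟨rfl, h⟩)
    · exact Or.inr ⟨rfl, h⟩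

theorem mem_altStep_aux {r m : Int} (fr : List Int) (acc : List Int) (y : Int) :
    y ∈ (fr.foldl (fun nxt v =>
          ([v * m, v + m, pyConcat v m]).foldl
            (fun nxt w => if w ≤ r then PySem.Set.add nxt w else nxt) nxt) acc) ↔
      y ∈ acc ∨ ∃ v ∈ fr, (y = v * m ∨ y = v + m ∨ y = pyConcat v m) ∧ y ≤ r := by
  induction fr generalizing acc with
  | nil => simp
  | cons x xs ih =>
    rw [List.foldl_cons, ih, mem_fold3]
    constructor
    · rintro ((h | h) | ⟨v, hv, hy⟩)
      · exact Or.inl h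
      · exact Or.inr ⟨x, by simp, h⟩
      · exact Or.inr ⟨v, by simp [hv], hy⟩
    · rintro (h | ⟨v, hv, hy⟩)
      · exact Or.inl (Or.inl h)
      · rcases List.mem_cons.mp hv with rfl | hv
        · exact Or.inl (Or.inr hy)
        · exact Or.inr ⟨v, hv, hy⟩

theorem mem_altStep {r m : Int} (fr : List Int) (y : Int) :
    y ∈ altStep r fr m ↔ ∃ v ∈ fr, (y = v * m ∨ y = v + m ∨ y = pyConcat v m) ∧ y ≤ r := by
  unfold altStep
  rw [mem_altStep_aux]
  simp [PySem.Set.empty]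

theorem main_lemma (r : Int) (l : List Int) (hl : l ≠ []) :
    ∀ S : List Int, (∀ v ∈ S, v ≤ r) →
      ((l.dropLast.foldl (altStep r) S).any (altFinal r ((l.getLast?).getD 0))
        = S.any (fun v => rec2 r v l)) := by
  induction l with
  | nil => exact absurd rfl hl
  | cons h t ih =>
    cases t with
    | nil =>
      intro S hS
      have hd : ([h] : List Int).dropLast = [] := rfl
      have hg : ((([h] : List Int).getLast?).getD 0) = h := rfl
      rw [hd, List.foldl_nil, hg]
      apply any_congrOn
      intro v hv
      rw [rec2_single r v h (hS v hv)]
      unfold altFinal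
      rw [Int.mul_comm h v, Int.add_comm h v]
    | cons h2 t2 =>
      intro S hS
      have hne : (h2 :: t2 : List Int) ≠ [] := by simp
      have hdrop : (h :: h2 :: t2).dropLast = h :: (h2 :: t2).dropLast := rfl
      have hlast : ((h :: h2 :: t2).getLast?) = ((h2 :: t2).getLast?) := by
        simp [List.getLast?_cons_cons]
      have hS' : ∀ v ∈ altStep r S h, v ≤ r := by
        intro v hv
        exact ((mem_altStep S v).mp hv).choose_spec.2.2
      rw [hdrop, hlast, List.foldl_cons, ih hne (altStep r S h) hS', Bool.eq_iff_iff]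
      simp only [List.any_eq_true]
      constructor
      · rintro ⟨w, hw, hP⟩
        rcases (mem_altStep S w).mp hw with ⟨v, hv, hch, _⟩
        refine ⟨v, hv, ?_⟩
        rw [rec2_cons_cons r v h h2 t2 (hS v hv)]
        rcases hch with rfl | rfl | rfl <;> simp [hP]
      · rintro ⟨v, hv, hP⟩
        rw [rec2_cons_cons r v h h2 t2 (hS v hv)] at hP
        rcases Bool.or_eq_true_iff.mp hP with hP' | hP3
        · rcases Bool.or_eq_true_iff.mp hP' with hP1 | hP2
          · have hle : v * h ≤ r := by
              by_contra hgt
              rw [rec2_of_gt _ (lt_of_not_ge hgt)] at hP1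
              exact Bool.false_ne_true hP1
            exact ⟨v * h, (mem_altStep S _).mpr ⟨v, hv, Or.inl rfl, hle⟩, hP1⟩
          · have hle : v + h ≤ r := by
              by_contra hgt
              rw [rec2_of_gt _ (lt_of_not_ge hgt)] at hP2
              exact Bool.false_ne_true hP2
            exact ⟨v + h, (mem_altStep S _).mpr ⟨v, hv, Or.inr (Or.inl rfl), hle⟩, hP2⟩
        · have hle : pyConcat v h ≤ r := by
            by_contra hgt
            rw [rec2_of_gt _ (lt_of_not_ge hgt)] at hP3
            exact Bool.false_ne_true hP3
          exact ⟨pyConcat v h, (mem_altStep S _).mpr ⟨v, hv, Or.inr (Or.inr rfl), hle⟩, hP3⟩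

theorem foldl_altStep_empty (r : Int) (xs : List Int) :
    xs.foldl (altStep r) ([] : List Int) = [] := by
  induction xs with
  | nil => rfl
  | cons x xs ih => simpa [altStep, PySem.Set.empty] using ih

-- ===== VERDICT (by name: the statement is the Claim_ definition above) =====
theorem rec2_spec : Claim_equal_rec2 := by
  intro r n ns _ hPre
  rcases hPre with ⟨hne, _⟩
  unfold Spec_rec2 rec2_alt
  simp only [PySem.List.slice_to_neg_one, PySem.List.pyGet?_neg_one]
  by_cases hnr : n ≤ r
  · rw [if_pos hnr, show PySem.Set.ofList [n] = [n] from rfl,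
      main_lemma r ns hne [n] (by intro v hv; rw [List.mem_singleton] at hv; omega)]
    simp
  · rw [if_neg hnr, show (PySem.Set.empty : PySem.Set Int) = ([] : List Int) from rfl,
      foldl_altStep_empty, rec2_of_gt ns (lt_of_not_ge hnr)]
    rfl
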